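-- pv_equiv track=rewrite | github.com/jeasonzhang-eth/capty | sidecar/capty_sidecar/engine.py | build_voice_list
-- ===== SOURCE A (Python) =====
-- _KNOWN_SPEAKERS: dict[str, dict[str, str]] = {
--     "vivian":   {"name": "Vivian",   "lang": "Chinese",  "gender": "Female"},
--     "serena":   {"name": "Serena",   "lang": "Chinese",  "gender": "Female"},
--     "uncle_fu": {"name": "Uncle Fu", "lang": "Chinese",  "gender": "Male"},
--     "dylan":    {"name": "Dylan",    "lang": "Chinese (Beijing Dialect)", "gender": "Male"},
--     "eric":     {"name": "Eric",     "lang": "Chinese (Sichuan Dialect)", "gender": "Male"},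
--     "chelsie":  {"name": "Chelsie",  "lang": "English",  "gender": "Female"},
--     "ryan":     {"name": "Ryan",     "lang": "English",  "gender": "Male"},
--     "aiden":    {"name": "Aiden",    "lang": "English",  "gender": "Male"},
--     "ethan":    {"name": "Ethan",    "lang": "English",  "gender": "Male"},
-- }
--
-- def build_voice_list(spk_id: dict) -> list[dict]:
--     """Build a structured voice list from a model's spk_id dict."""
--     lang_order = ["Chinese", "English"]
--
--     def sort_key(name: str) -> tuple:
--         meta = _KNOWN_SPEAKERS.get(name, {})
--         lang = meta.get("lang", "")
--         base_lang = lang.split("(")[0].strip() if lang else "ZZZ"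
--         idx = lang_order.index(base_lang) if base_lang in lang_order else 99
--         return (idx, name)
--
--     voices: list[dict] = []
--     for name in sorted(spk_id.keys(), key=sort_key):
--         meta = _KNOWN_SPEAKERS.get(name, {})
--         voices.append({
--             "id": name,
--             "name": meta.get("name", name.capitalize()),
--             "lang": meta.get("lang", ""),
--             "gender": meta.get("gender", ""),
--         })
--     return voices
-- ===== SOURCE B (Python) =====
-- _KNOWN_SPEAKERS: dict[str, dict[str, str]] = {
--     "vivian":   {"name": "Vivian",   "lang": "Chinese",  "gender": "Female"},
--     "serena":   {"name": "Serena",   "lang": "Chinese",  "gender": "Female"},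
--     "uncle_fu": {"name": "Uncle Fu", "lang": "Chinese",  "gender": "Male"},
--     "dylan":    {"name": "Dylan",    "lang": "Chinese (Beijing Dialect)", "gender": "Male"},
--     "eric":     {"name": "Eric",     "lang": "Chinese (Sichuan Dialect)", "gender": "Male"},
--     "chelsie":  {"name": "Chelsie",  "lang": "English",  "gender": "Female"},
--     "ryan":     {"name": "Ryan",     "lang": "English",  "gender": "Male"},
--     "aiden":    {"name": "Aiden",    "lang": "English",  "gender": "Male"},
--     "ethan":    {"name": "Ethan",    "lang": "English",  "gender": "Male"},
-- }
--
--
-- def _lang_index(name: str) -> int: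
--     lang = _KNOWN_SPEAKERS.get(name, {}).get("lang", "")
--     base = lang.split("(")[0].strip() if lang else "ZZZ"
--     if base == "Chinese":
--         return 0
--     if base == "English":
--         return 1
--     return 99
--
--
-- def _make_voice(name: str) -> dict:
--     meta = _KNOWN_SPEAKERS.get(name, {})
--     return {
--         "id": name,
--         "name": meta.get("name", name.capitalize()),
--         "lang": meta.get("lang", ""),
--         "gender": meta.get("gender", ""),
--     }
--
--
-- def build_voice_list(spk_id: dict) -> list[dict]:
--     """Build a structured voice list from a model's spk_id dict."""
--     buckets: dict[int, list[str]] = {0: [], 1: [], 99: []}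
--     for name in spk_id.keys():
--         buckets[_lang_index(name)].append(name)
--     return [_make_voice(name) for idx in (0, 1, 99) for name in sorted(buckets[idx])]
-- ===== Notes on version B (the rewrite author's own statement) =====
-- stated objective: alternative
-- what changed: Replaces the single comparator sort with a composite (idx, name) key by a one-pass partition of the dict keys into three language buckets (Chinese/English/unknown) followed by a plain name-sort within each bucket, concatenated in bucket order.
import Mathlib
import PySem

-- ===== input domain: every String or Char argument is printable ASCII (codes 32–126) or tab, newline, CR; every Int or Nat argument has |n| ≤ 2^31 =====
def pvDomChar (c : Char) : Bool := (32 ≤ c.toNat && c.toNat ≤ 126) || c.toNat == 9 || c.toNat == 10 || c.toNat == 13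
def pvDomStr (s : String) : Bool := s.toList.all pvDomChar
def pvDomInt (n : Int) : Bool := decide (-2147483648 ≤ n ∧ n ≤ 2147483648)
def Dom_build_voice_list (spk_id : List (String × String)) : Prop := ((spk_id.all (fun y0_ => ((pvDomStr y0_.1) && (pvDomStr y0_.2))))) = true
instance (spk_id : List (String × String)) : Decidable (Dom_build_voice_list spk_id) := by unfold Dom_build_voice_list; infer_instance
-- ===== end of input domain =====

-- B replaces the composite-key comparator sort by a partition into three language buckets,
-- each sorted by the plain name; same output, no speed claim (objective: alternative).

-- shared module-level context: the _KNOWN_SPEAKERS table (used by both A and B, as in the Python module)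
def knownSpeakers : PySem.Dict String (PySem.Dict String String) :=
  PySem.Dict.mk
    [("vivian",   PySem.Dict.mk [("name", "Vivian"),   ("lang", "Chinese"),  ("gender", "Female")]),
     ("serena",   PySem.Dict.mk [("name", "Serena"),   ("lang", "Chinese"),  ("gender", "Female")]),
     ("uncle_fu", PySem.Dict.mk [("name", "Uncle Fu"), ("lang", "Chinese"),  ("gender", "Male")]),
     ("dylan",    PySem.Dict.mk [("name", "Dylan"),    ("lang", "Chinese (Beijing Dialect)"), ("gender", "Male")]),
     ("eric",     PySem.Dict.mk [("name", "Eric"),     ("lang", "Chinese (Sichuan Dialect)"), ("gender", "Male")]),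
     ("chelsie",  PySem.Dict.mk [("name", "Chelsie"),  ("lang", "English"),  ("gender", "Female")]),
     ("ryan",     PySem.Dict.mk [("name", "Ryan"),     ("lang", "English"),  ("gender", "Male")]),
     ("aiden",    PySem.Dict.mk [("name", "Aiden"),    ("lang", "English"),  ("gender", "Male")]),
     ("ethan",    PySem.Dict.mk [("name", "Ethan"),    ("lang", "English"),  ("gender", "Male")])]

-- name.capitalize(): exact on the ASCII domain (first char uppercased, rest lowercased)
def capitalizeAscii (s : String) : String :=
  match s.toList with
  | [] => ""
  | c :: rest => String.ofList (c.toUpper :: rest.map Char.toLower)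

-- lang.split("(")[0].strip() if lang else "ZZZ"   (split? "(" is always some and nonempty, so the defaults are unreachable)
def baseLang (lang : String) : String :=
  if lang ≠ "" then PySem.Str.strip (((PySem.Str.split? lang "(").getD []).getD 0 "")
  else "ZZZ"

-- ===== PORT A =====
def langOrder : List String := ["Chinese", "English"]

-- A's sort_key: the idx component ((idx, name) tuple key is ported as sorted2 with k1 = sortKey1, k2 = id)
def sortKey1 (name : String) : Int :=
  let m := PySem.Dict.getD knownSpeakers name PySem.Dict.empty
  let lang := PySem.Dict.getD m "lang" ""
  let base := baseLang lang
  if base ∈ langOrder then (PySem.List.index? langOrder base).getD 99 else 99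

def build_voice_list (spk_id : List (String × String)) : List (List (String × String)) :=
  let keys := PySem.List.dedup (spk_id.map (·.1))   -- spk_id.keys()
  (PySem.List.sorted2 keys sortKey1 (fun n => n)).foldl (fun voices name =>
    let m := PySem.Dict.getD knownSpeakers name PySem.Dict.empty
    voices ++ [[("id", name),
                ("name", PySem.Dict.getD m "name" (capitalizeAscii name)),
                ("lang", PySem.Dict.getD m "lang" ""),
                ("gender", PySem.Dict.getD m "gender" "")]]) []

-- ===== PORT B =====
def langIndex (name : String) : Int :=
  let lang := PySem.Dict.getD (PySem.Dict.getD knownSpeakers name PySem.Dict.empty) "lang" ""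
  let base := baseLang lang
  if base = "Chinese" then 0 else if base = "English" then 1 else 99

def makeVoice (name : String) : List (String × String) :=
  let m := PySem.Dict.getD knownSpeakers name PySem.Dict.empty
  [("id", name),
   ("name", PySem.Dict.getD m "name" (capitalizeAscii name)),
   ("lang", PySem.Dict.getD m "lang" ""),
   ("gender", PySem.Dict.getD m "gender" "")]

def build_voice_list_alt (spk_id : List (String × String)) : List (List (String × String)) :=
  let keys := PySem.List.dedup (spk_id.map (·.1))   -- spk_id.keys()
  let buckets := keys.foldl (fun (b : List String × List String × List String) name =>
      let i := langIndex name
      if i = 0 then (b.1 ++ [name], b.2.1, b.2.2)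
      else if i = 1 then (b.1, b.2.1 ++ [name], b.2.2)
      else (b.1, b.2.1, b.2.2 ++ [name])) ([], [], [])
  ((PySem.List.sorted buckets.1 (fun n => n)) ++
   (PySem.List.sorted buckets.2.1 (fun n => n)) ++
   (PySem.List.sorted buckets.2.2 (fun n => n))).map makeVoice

-- ===== PRECONDITION & SPEC =====
def Spec_build_voice_list (spk_id : List (String × String)) (out : List (List (String × String))) : Prop := out = build_voice_list_alt spk_id
instance (spk_id : List (String × String)) (out : List (List (String × String))) : Decidable (Spec_build_voice_list spk_id out) := by unfold Spec_build_voice_list; infer_instance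

-- ===== CLAIM (what is proved, stated in full; the proofs are below) =====
def Claim_equal_build_voice_list : Prop := ∀ (spk_id : List (String × String)), Dom_build_voice_list spk_id → Spec_build_voice_list spk_id (build_voice_list spk_id)

-- ===== LEMMAS AND PROOFS =====

theorem key_eq (n : String) : sortKey1 n = langIndex n := by
  unfold sortKey1 langIndex
  dsimp only
  generalize baseLang ((knownSpeakers.getD n PySem.Dict.empty).getD "lang" "") = base
  by_cases h0 : base = "Chinese"
  · subst h0; simp [langOrder, PySem.List.index?_eq_idxOf?, List.idxOf?]
  · by_cases h1 : base = "English"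
    · subst h1
      simp only [langOrder, h0, PySem.List.index?_eq_idxOf?, List.idxOf?, if_pos (Or.inr rfl)]
      decide
    · simp [langOrder, h0, h1]

theorem langIndex_cases (n : String) : langIndex n = 0 ∨ langIndex n = 1 ∨ langIndex n = 99 := by
  unfold langIndex
  dsimp only
  split_ifs <;> simp

-- generic facts about PySem's insertion sort (foldl insertBy)

theorem insertBy_perm {α : Type} (lt : α → α → Bool) (x : α) (ys : List α) :
    (PySem.List.insertBy lt x ys).Perm (x :: ys) := by
  induction ys with
  | nil => simp [PySem.List.insertBy]
  | cons y ys ih =>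
    simp only [PySem.List.insertBy]
    split
    · exact List.Perm.refl _
    · exact (ih.cons y).trans (List.Perm.swap x y ys)

theorem foldl_insertBy_perm {α : Type} (lt : α → α → Bool) (xs acc : List α) :
    (xs.foldl (fun acc x => PySem.List.insertBy lt x acc) acc).Perm (xs ++ acc) := by
  induction xs generalizing acc with
  | nil => simp
  | cons x xs ih =>
    simp only [List.foldl_cons, List.cons_append]
    exact ((ih _).trans ((insertBy_perm lt x acc).append_left xs)).trans List.perm_middle

theorem insertBy_sortedBy {α : Type} (lt : α → α → Bool)
    (htrans : ∀ a b c, lt a b = true → lt b c = true → lt a c = true)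
    (hasym : ∀ a b, lt a b = true → lt b a = false)
    (x : α) (ys : List α) (h : ys.Pairwise (fun a b => lt b a = false)) :
    (PySem.List.insertBy lt x ys).Pairwise (fun a b => lt b a = false) := by
  induction ys with
  | nil => simp [PySem.List.insertBy]
  | cons y ys ih =>
    rcases List.pairwise_cons.mp h with ⟨hy, hys⟩
    simp only [PySem.List.insertBy]
    split
    · rename_i h1
      refine List.pairwise_cons.mpr ⟨?_, h⟩
      intro z hz
      rcases List.mem_cons.mp hz with rfl | hz'
      · exact hasym _ _ h1
      · by_contra hc
        have hzx : lt z x = true := by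
          cases hzx : lt z x
          · exact absurd hzx hc
          · rfl
        have := htrans _ _ _ hzx h1
        rw [hy z hz'] at this
        exact Bool.false_ne_true this
    · rename_i h1
      refine List.pairwise_cons.mpr ⟨?_, ih hys⟩
      intro z hz
      rcases (PySem.List.mem_insertBy lt x z ys).mp hz with rfl | hz'
      · exact Bool.not_eq_true _ |>.mp h1
      · exact hy z hz'

theorem foldl_insertBy_sortedBy {α : Type} (lt : α → α → Bool)
    (htrans : ∀ a b c, lt a b = true → lt b c = true → lt a c = true)
    (hasym : ∀ a b, lt a b = true → lt b a = false)
    (xs acc : List α) (hacc : acc.Pairwise (fun a b => lt b a = false)) :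
    (xs.foldl (fun acc x => PySem.List.insertBy lt x acc) acc).Pairwise (fun a b => lt b a = false) := by
  induction xs generalizing acc with
  | nil => exact hacc
  | cons x xs ih => exact ih _ (insertBy_sortedBy lt htrans hasym x acc hacc)

-- a permutation that is strictly lt-chained is THE insertion-sorted order
theorem sortedBy_unique {α : Type} (lt : α → α → Bool) :
    ∀ (ys res : List α), res.Perm ys → res.Pairwise (fun a b => lt b a = false) →
      ys.Pairwise (fun a b => lt a b = true) → res = ys := by
  intro ys
  induction ys with
  | nil => intro res h _ _; exact List.perm_nil.mp h
  | cons y ys ih =>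
    intro res hperm hres hys
    cases res with
    | nil => exact absurd (List.nil_perm.mp hperm) (by simp)
    | cons r res' =>
      rcases List.pairwise_cons.mp hys with ⟨hylt, hys'⟩
      rcases List.pairwise_cons.mp hres with ⟨hrfalse, hres'⟩
      have hry : r = y := by
        by_contra hne
        have hr' : r ∈ ys := by
          rcases List.mem_cons.mp (hperm.subset (List.mem_cons_self)) with h | h
          · exact absurd h hne
          · exact h
        have hy' : y ∈ res' := by
          rcases List.mem_cons.mp (hperm.mem_iff.mpr (List.mem_cons_self)) with h | h
          · exact absurd h.symm hne
          · exact h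
        have h1 := hylt r hr'
        have h2 := hrfalse y hy'
        rw [h1] at h2
        simp at h2
      subst hry
      rw [ih res' hperm.cons_inv hres' hys']

theorem foldl_insertBy_eq {α : Type} (lt : α → α → Bool)
    (htrans : ∀ a b c, lt a b = true → lt b c = true → lt a c = true)
    (hasym : ∀ a b, lt a b = true → lt b a = false)
    (xs ys : List α) (hperm : ys.Perm xs) (hpw : ys.Pairwise (fun a b => lt a b = true)) :
    xs.foldl (fun acc x => PySem.List.insertBy lt x acc) [] = ys :=
  sortedBy_unique lt ys _
    ((foldl_insertBy_perm lt xs []).trans (by simpa using hperm.symm))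
    (foldl_insertBy_sortedBy lt htrans hasym xs [] (List.Pairwise.nil))
    hpw

-- the lexicographic comparator of sorted2 is asymmetric and transitive
theorem lex2_trans {α κ₁ κ₂ : Type} [LinearOrder κ₁] [LinearOrder κ₂] (k1 : α → κ₁) (k2 : α → κ₂)
    (a b c : α)
    (h : (decide (k1 a < k1 b) || (!decide (k1 b < k1 a) && decide (k2 a < k2 b))) = true)
    (h' : (decide (k1 b < k1 c) || (!decide (k1 c < k1 b) && decide (k2 b < k2 c))) = true) :
    (decide (k1 a < k1 c) || (!decide (k1 c < k1 a) && decide (k2 a < k2 c))) = true := by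
  simp only [Bool.or_eq_true, Bool.and_eq_true, Bool.not_eq_true', decide_eq_true_eq,
    decide_eq_false_iff_not] at h h' ⊢
  rcases h with h | ⟨h1, h2⟩ <;> rcases h' with h' | ⟨h1', h2'⟩
  · exact Or.inl (lt_trans h h')
  · exact Or.inl (lt_of_lt_of_le h (not_lt.mp h1'))
  · exact Or.inl (lt_of_le_of_lt (not_lt.mp h1) h')
  · exact Or.inr ⟨fun hc => h1 (lt_of_le_of_lt (not_lt.mp h1') hc), lt_trans h2 h2'⟩

theorem lex2_asym {α κ₁ κ₂ : Type} [LinearOrder κ₁] [LinearOrder κ₂] (k1 : α → κ₁) (k2 : α → κ₂)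
    (a b : α)
    (h : (decide (k1 a < k1 b) || (!decide (k1 b < k1 a) && decide (k2 a < k2 b))) = true) :
    (decide (k1 b < k1 a) || (!decide (k1 a < k1 b) && decide (k2 b < k2 a))) = false := by
  simp only [Bool.or_eq_true, Bool.and_eq_true, Bool.not_eq_true', decide_eq_true_eq,
    decide_eq_false_iff_not, Bool.or_eq_false_iff, Bool.and_eq_false_iff] at h ⊢
  rcases h with h | ⟨h1, h2⟩
  · exact ⟨lt_asymm h, Or.inl (by simpa using h)⟩
  · exact ⟨h1, Or.inr (by simpa using lt_asymm h2)⟩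

-- predicates of the three buckets
def pIs0 (n : String) : Bool := decide (langIndex n = 0)
def pIs1 (n : String) : Bool := decide (langIndex n = 1)
def pIs99 (n : String) : Bool := decide (¬ langIndex n = 0 ∧ ¬ langIndex n = 1)

-- B's single partitioning pass computes the three filters
theorem buckets_eq (l : List String) (a b c : List String) :
    l.foldl (fun (bk : List String × List String × List String) name =>
        let i := langIndex name
        if i = 0 then (bk.1 ++ [name], bk.2.1, bk.2.2)
        else if i = 1 then (bk.1, bk.2.1 ++ [name], bk.2.2)
        else (bk.1, bk.2.1, bk.2.2 ++ [name])) (a, b, c)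
      = (a ++ l.filter pIs0, b ++ l.filter pIs1, c ++ l.filter pIs99) := by
  induction l generalizing a b c with
  | nil => simp
  | cons x l ih =>
    simp only [List.foldl_cons]
    by_cases h0 : langIndex x = 0
    · simp [h0, ih, pIs0, pIs1, pIs99, List.filter_cons]
    · by_cases h1 : langIndex x = 1
      · simp [h0, h1, ih, pIs0, pIs1, pIs99, List.filter_cons]
      · simp [h0, h1, ih, pIs0, pIs1, pIs99, List.filter_cons]

-- the three filters partition the list (up to permutation)
theorem filter_partition_perm (l : List String) :
    (l.filter pIs0 ++ l.filter pIs1 ++ l.filter pIs99).Perm l := by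
  induction l with
  | nil => simp
  | cons x l ih =>
    by_cases h0 : langIndex x = 0
    · simpa [List.filter_cons, pIs0, pIs1, pIs99, h0] using ih.cons x
    · by_cases h1 : langIndex x = 1
      · simp only [List.filter_cons, pIs0, pIs1, pIs99, h0, h1]
        simp only [decide_eq_true_eq, if_neg h0, decide_true]
        refine List.Perm.trans ?_ (ih.cons x)
        simpa [List.append_assoc] using
          (List.perm_middle (a := x) (l₁ := l.filter pIs0) (l₂ := l.filter pIs1 ++ l.filter pIs99))
      · simp only [List.filter_cons, pIs0, pIs1, pIs99, h0, h1]
        simp only [decide_eq_true_eq, if_neg h0, not_false_iff, and_self, decide_true]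
        refine List.Perm.trans ?_ (ih.cons x)
        simpa [List.append_assoc] using
          (List.perm_middle (a := x) (l₁ := l.filter pIs0 ++ l.filter pIs1) (l₂ := l.filter pIs99))

-- the comparator of A's sorted2 call
def ltKey (a b : String) : Bool :=
  decide (sortKey1 a < sortKey1 b) || (!decide (sortKey1 b < sortKey1 a) && decide (a < b))

theorem sorted2_ltKey (xs : List String) :
    PySem.List.sorted2 xs sortKey1 (fun n => n) =
      xs.foldl (fun acc x => PySem.List.insertBy ltKey x acc) [] := rfl

theorem ltKey_trans (a b c : String) (h : ltKey a b = true) (h' : ltKey b c = true) :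
    ltKey a c = true := lex2_trans sortKey1 (fun n => n) a b c h h'

theorem ltKey_asym (a b : String) (h : ltKey a b = true) : ltKey b a = false :=
  lex2_asym sortKey1 (fun n => n) a b h

theorem ltKey_of_idx_lt {a b : String} (h : langIndex a < langIndex b) : ltKey a b = true := by
  unfold ltKey
  rw [key_eq a, key_eq b]
  simp [h]

theorem ltKey_of_idx_eq_lt {a b : String} (h : langIndex a = langIndex b) (h' : a < b) :
    ltKey a b = true := by
  unfold ltKey
  rw [key_eq a, key_eq b, h]
  simp [h']

-- a name-sorted duplicate-free bucket is strictly <-chained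
theorem sorted_bucket_pairwise_lt (bk : List String) (hnd : bk.Nodup) :
    (PySem.List.sorted bk (fun n => n)).Pairwise (fun a b => a < b) := by
  have hple := PySem.List.sorted_pairwise bk (fun n => n)
  have hnd' : (PySem.List.sorted bk (fun n => n)).Nodup :=
    ((PySem.List.sorted_perm bk (fun n => n) false).symm.nodup hnd)
  have := hple.and hnd'
  exact this.imp fun ⟨hle, hne⟩ => lt_of_le_of_ne hle hne

theorem mem_sorted_filter {p : String → Bool} {bk : List String} {x : String}
    (h : x ∈ PySem.List.sorted (bk.filter p) (fun n => n)) : p x = true := by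
  rw [PySem.List.mem_sorted] at h
  exact (List.mem_filter.mp h).2

-- the concatenation of the three sorted buckets is strictly ltKey-chained
theorem target_pairwise (keys : List String) (hnd : keys.Nodup) :
    ((PySem.List.sorted (keys.filter pIs0) (fun n => n) ++
      PySem.List.sorted (keys.filter pIs1) (fun n => n)) ++
      PySem.List.sorted (keys.filter pIs99) (fun n => n)).Pairwise
      (fun a b => ltKey a b = true) := by
  have hpw : ∀ p : String → Bool,
      (PySem.List.sorted (keys.filter p) (fun n => n)).Pairwise (fun a b => a < b) :=
    fun p => sorted_bucket_pairwise_lt _ (hnd.filter p)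
  have hsame : ∀ (p : String → Bool), (∀ x y, p x = true → p y = true → langIndex x = langIndex y) →
      (PySem.List.sorted (keys.filter p) (fun n => n)).Pairwise (fun a b => ltKey a b = true) := by
    intro p hp
    refine ((hpw p).imp_of_mem ?_)
    intro a b ha hb hlt
    exact ltKey_of_idx_eq_lt (hp a b (mem_sorted_filter ha) (mem_sorted_filter hb)) hlt
  have h99 : ∀ x : String, pIs99 x = true → langIndex x = 99 := by
    intro x hx
    simp only [pIs99, decide_eq_true_eq] at hx
    rcases langIndex_cases x with h | h | h
    · exact absurd h hx.1
    · exact absurd h hx.2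
    · exact h
  rw [List.pairwise_append]
  refine ⟨?_, hsame pIs99 ?_, ?_⟩
  · rw [List.pairwise_append]
    refine ⟨hsame pIs0 ?_, hsame pIs1 ?_, ?_⟩
    · intro x y hx hy
      simp only [pIs0, decide_eq_true_eq] at hx hy; rw [hx, hy]
    · intro x y hx hy
      simp only [pIs1, decide_eq_true_eq] at hx hy; rw [hx, hy]
    · intro a ha b hb
      have ha' := mem_sorted_filter ha
      have hb' := mem_sorted_filter hb
      simp only [pIs0, pIs1, decide_eq_true_eq] at ha' hb'
      exact ltKey_of_idx_lt (by rw [ha', hb']; norm_num)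
  · intro x y hx hy
    rw [h99 x hx, h99 y hy]
  · intro a ha b hb
    have hb' := h99 b (mem_sorted_filter hb)
    rcases List.mem_append.mp ha with ha | ha
    · have := mem_sorted_filter ha
      simp only [pIs0, decide_eq_true_eq] at this
      exact ltKey_of_idx_lt (by rw [this, hb']; norm_num)
    · have := mem_sorted_filter ha
      simp only [pIs1, decide_eq_true_eq] at this
      exact ltKey_of_idx_lt (by rw [this, hb']; norm_num)

-- A's appending loop is a map
theorem a_loop_eq (l : List String) (acc : List (List (String × String))) :
    l.foldl (fun voices name =>
      let m := PySem.Dict.getD knownSpeakers name PySem.Dict.empty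
      voices ++ [[("id", name),
                  ("name", PySem.Dict.getD m "name" (capitalizeAscii name)),
                  ("lang", PySem.Dict.getD m "lang" ""),
                  ("gender", PySem.Dict.getD m "gender" "")]]) acc
      = acc ++ l.map makeVoice := by
  induction l generalizing acc with
  | nil => simp
  | cons x l ih => simp [ih, makeVoice]

theorem build_voice_list_spec : Claim_equal_build_voice_list := by
  intro spk_id _
  unfold Spec_build_voice_list build_voice_list build_voice_list_alt
  dsimp only
  rw [a_loop_eq, List.nil_append, buckets_eq, List.nil_append, List.nil_append, List.nil_append]
  dsimp only
  rw [sorted2_ltKey]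
  rw [foldl_insertBy_eq ltKey ltKey_trans ltKey_asym
    _ _ ?_ (target_pairwise _ (PySem.List.nodup_dedup _))]
  exact ((((PySem.List.sorted_perm _ _ _).append (PySem.List.sorted_perm _ _ _)).append
    (PySem.List.sorted_perm _ _ _)).trans (filter_partition_perm _))
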